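-- pv_equiv track=rewrite | github.com/NeroAgent/openclaw-premium-portfolio | skills/skill-health/scripts/audit.py | compute_health_score
-- ===== SOURCE A (Python) =====
-- SEVERITY_CRITICAL = "critical"
--
-- SEVERITY_WARNING = "warning"
--
-- STATUS_HEALTHY = "healthy"
--
-- STATUS_WARNING = "warning"
--
-- STATUS_ERROR = "error"
--
-- def compute_health_score(issues):
--     """Compute health score (0-100) and status based on issues."""
--     score = 100
--     has_critical = False
--     has_warning = False
--
--     for issue in issues:
--         if issue["severity"] == SEVERITY_CRITICAL:
--             score -= 30
--             has_critical = True
--         elif issue["severity"] == SEVERITY_WARNING: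
--             score -= 5
--             has_warning = True
--         else:
--             score -= 1
--
--     if has_critical:
--         status = STATUS_ERROR
--     elif has_warning:
--         status = STATUS_WARNING
--     else:
--         status = STATUS_HEALTHY
--
--     return max(0, score), status
-- ===== SOURCE B (Python) =====
-- def compute_health_score(issues):
--     """Compute health score (0-100) and status based on issues."""
--     sevs = [issue["severity"] for issue in issues]
--     crit = sevs.count("critical")
--     warn = sevs.count("warning")
--     other = len(sevs) - crit - warn
--     score = max(0, 100 - 30 * crit - 5 * warn - other)
--     status = "error" if crit else ("warning" if warn else "healthy")
--     return score, status
-- ===== Notes on version B (the rewrite author's own statement) =====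
-- stated objective: simpler
-- what changed: Replaces the per-iteration score mutation and boolean flags with a tally-then-closed-form decomposition: count critical/warning severities once, compute the score by formula, and derive the status from the counts.
import Mathlib
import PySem

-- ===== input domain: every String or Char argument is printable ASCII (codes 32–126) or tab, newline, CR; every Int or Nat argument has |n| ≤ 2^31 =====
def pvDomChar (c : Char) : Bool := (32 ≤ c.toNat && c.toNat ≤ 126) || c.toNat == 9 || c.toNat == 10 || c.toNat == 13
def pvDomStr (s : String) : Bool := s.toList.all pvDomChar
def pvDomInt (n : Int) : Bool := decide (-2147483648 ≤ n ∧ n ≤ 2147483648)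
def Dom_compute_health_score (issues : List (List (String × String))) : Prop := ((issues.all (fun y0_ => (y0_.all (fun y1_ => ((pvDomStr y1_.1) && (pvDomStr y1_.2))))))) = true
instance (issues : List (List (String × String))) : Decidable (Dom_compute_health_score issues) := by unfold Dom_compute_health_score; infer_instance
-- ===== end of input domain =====

-- B is a simpler decomposition of A (tally severities once, then compute score/status in
-- closed form); equal return values are proved on all inputs where every issue has a
-- "severity" key (Python's A raises KeyError otherwise).

-- ===== PORT A =====
-- issue["severity"] (present by Pre_; on a missing key Python raises KeyError, excluded by Pre_)
def pvSev (issue : List (String × String)) : String :=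
  ((PySem.Dict.mk issue).get? "severity").getD ""

def compute_health_score (issues : List (List (String × String))) : Int × String :=
  let st := issues.foldl (fun (acc : Int × Bool × Bool) issue =>
    if pvSev issue = "critical" then (acc.1 - 30, true, acc.2.2)
    else if pvSev issue = "warning" then (acc.1 - 5, acc.2.1, true)
    else (acc.1 - 1, acc.2.1, acc.2.2)) (100, false, false)
  let status := if st.2.1 then "error" else if st.2.2 then "warning" else "healthy"
  (max 0 st.1, status)

-- ===== PORT B =====
def compute_health_score_alt (issues : List (List (String × String))) : Int × String :=
  let sevs := issues.map pvSev
  let crit : Int := PySem.List.count sevs "critical"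
  let warn : Int := PySem.List.count sevs "warning"
  let other : Int := (sevs.length : Int) - crit - warn
  let score := max 0 (100 - 30 * crit - 5 * warn - other)
  let status := if crit ≠ 0 then "error" else if warn ≠ 0 then "warning" else "healthy"
  (score, status)

-- ===== PRECONDITION & SPEC =====
-- Pre_ excludes exactly the inputs where some issue lacks a "severity" key: there A raises KeyError.
def Pre_compute_health_score (issues : List (List (String × String))) : Prop :=
  ∀ issue ∈ issues, ((PySem.Dict.mk issue).get? "severity").isSome = true
instance (issues : List (List (String × String))) : Decidable (Pre_compute_health_score issues) := by unfold Pre_compute_health_score; infer_instance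

def pvWitness_compute_health_score : (List (List (String × String))) :=
  [[("severity", "critical")], [("severity", "info")]]

def Spec_compute_health_score (issues : List (List (String × String))) (out : Int × String) : Prop := out = compute_health_score_alt issues
instance (issues : List (List (String × String))) (out : Int × String) : Decidable (Spec_compute_health_score issues out) := by unfold Spec_compute_health_score; infer_instance

-- ===== CLAIM (what is proved, stated in full; the proofs are below) =====
def Claim_equal_compute_health_score : Prop := ∀ (issues : List (List (String × String))), Dom_compute_health_score issues → Pre_compute_health_score issues → Spec_compute_health_score issues (compute_health_score issues)

-- ===== LEMMAS AND PROOFS =====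
-- Loop invariant for A's fold: the state after folding `issues` from (s, hc, hw) is
-- determined by the severity counts of `issues`.
theorem pv_fold_eq (issues : List (List (String × String))) :
    ∀ (s : Int) (hc hw : Bool),
      issues.foldl (fun (acc : Int × Bool × Bool) issue =>
        if pvSev issue = "critical" then (acc.1 - 30, true, acc.2.2)
        else if pvSev issue = "warning" then (acc.1 - 5, acc.2.1, true)
        else (acc.1 - 1, acc.2.1, acc.2.2)) (s, hc, hw)
      = (s - 30 * ((issues.map pvSev).count "critical" : Int)
           - 5 * ((issues.map pvSev).count "warning" : Int)
           - (((issues.map pvSev).length : Int)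
              - ((issues.map pvSev).count "critical" : Int)
              - ((issues.map pvSev).count "warning" : Int)),
         hc || decide (0 < (issues.map pvSev).count "critical"),
         hw || decide (0 < (issues.map pvSev).count "warning")) := by
  induction issues with
  | nil => intro s hc hw; simp
  | cons x xs ih =>
    intro s hc hw
    simp only [List.foldl_cons, List.map_cons]
    by_cases h1 : pvSev x = "critical"
    · simp only [ih, List.count_cons]
      simp [h1]
      omega
    · by_cases h2 : pvSev x = "warning"
      · simp only [ih, List.count_cons]
        simp [h2]
        omega
      · simp only [ih, List.count_cons]
        simp [h1, h2]
        omega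

-- ===== VERDICT (by name: the statement is the Claim_ definition above) =====
theorem compute_health_score_spec : Claim_equal_compute_health_score := by
  intro issues _ _
  show compute_health_score issues = compute_health_score_alt issues
  simp only [compute_health_score, compute_health_score_alt, pv_fold_eq,
    PySem.List.count_eq]
  refine congrArg₂ Prod.mk rfl ?_
  have e1 : (0 < (issues.map pvSev).count "critical") ↔ ((((issues.map pvSev).count "critical" : Int)) ≠ 0) := by omega
  have e2 : (0 < (issues.map pvSev).count "warning") ↔ ((((issues.map pvSev).count "warning" : Int)) ≠ 0) := by omega
  simp only [Bool.false_or, decide_eq_true_eq, e1, e2]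
  split_ifs <;> rfl
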